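-- pv_equiv track=rewrite | github.com/kelro323/daelim | mapping_data.py | remove_same_time
-- ===== SOURCE A (Python) =====
-- def remove_same_time(all_value):
--     result_list = []
--     for i in range(0, len(all_value) - 1):
--         if all_value[i][0] == all_value[i + 1][0]:
--             continue
--         else:
--             result_list.append(all_value[i])
--     result_list.append(all_value[len(all_value)-1])
--     return result_list
-- ===== SOURCE B (Python) =====
-- def remove_same_time(all_value):
--     # Right-to-left pass: start from the last entry, walk the prefix backwards,
--     # keep a row only when its timestamp differs from the most recently kept one,
--     # then reverse the accumulator to restore original order.
--     out = [all_value[-1]]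
--     for row in reversed(all_value[:-1]):
--         if row[0] != out[-1][0]:
--             out.append(row)
--     out.reverse()
--     return out
-- ===== Notes on version B (the rewrite author's own statement) =====
-- stated objective: alternative
-- what changed: Replaced A's left-to-right index loop comparing each element with its right neighbour (plus a separate final append) by a right-to-left traversal that seeds the accumulator with the last entry, keeps a row only when its timestamp differs from the most recently kept row, and reverses the accumulator at the end.
import Mathlib
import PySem

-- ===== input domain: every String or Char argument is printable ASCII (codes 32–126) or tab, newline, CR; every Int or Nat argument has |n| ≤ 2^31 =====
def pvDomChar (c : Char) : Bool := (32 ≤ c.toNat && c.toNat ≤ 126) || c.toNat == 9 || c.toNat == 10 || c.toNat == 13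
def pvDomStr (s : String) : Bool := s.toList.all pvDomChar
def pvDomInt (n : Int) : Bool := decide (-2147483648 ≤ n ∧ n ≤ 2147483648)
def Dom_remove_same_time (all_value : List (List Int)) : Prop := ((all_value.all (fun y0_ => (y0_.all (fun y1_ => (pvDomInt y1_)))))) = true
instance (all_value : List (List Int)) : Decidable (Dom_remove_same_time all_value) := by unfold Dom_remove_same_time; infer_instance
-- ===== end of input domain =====

-- B replaces A's left-to-right neighbour-comparison loop by a right-to-left pass
-- that keeps a row when its timestamp differs from the most recently kept one,
-- reversing the accumulator at the end (alternative decomposition, same cost).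

-- ===== PORT A =====
-- x[0] with default (indices in range under Pre_)
def pvKey (x : List Int) : Int := PySem.List.pyGetD x 0 0

-- loop body of `for i in range(0, len(all_value) - 1)`
def pvBodyA (xs : List (List Int)) (acc : List (List Int)) (i : Int) : List (List Int) :=
  if pvKey (PySem.List.pyGetD xs i []) = pvKey (PySem.List.pyGetD xs (i + 1) [])
  then acc
  else acc ++ [PySem.List.pyGetD xs i []]

def remove_same_time (all_value : List (List Int)) : List (List Int) :=
  let result_list :=
    (PySem.List.pyRange 0 ((all_value.length : Int) - 1) 1).foldl (pvBodyA all_value) []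
  result_list ++ [PySem.List.pyGetD all_value ((all_value.length : Int) - 1) []]

-- ===== PORT B =====
-- loop body: keep `row` when row[0] != out[-1][0]
def pvBodyB (out : List (List Int)) (row : List Int) : List (List Int) :=
  if pvKey row ≠ pvKey (PySem.List.pyGetD out (-1) []) then out ++ [row] else out

def remove_same_time_alt (all_value : List (List Int)) : List (List Int) :=
  let out0 : List (List Int) := [PySem.List.pyGetD all_value (-1) []]
  let out := ((PySem.List.slice all_value none (some (-1))).reverse).foldl pvBodyB out0
  out.reverse

-- ===== PRECONDITION & SPEC =====
-- Pre_ excludes exactly the inputs where the Python raises IndexError: the empty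
-- list (all_value[-1]), and lists of ≥ 2 rows containing an empty row (row[0]).
def Pre_remove_same_time (all_value : List (List Int)) : Prop :=
  all_value ≠ [] ∧ (all_value.length = 1 ∨ ∀ row ∈ all_value, row ≠ [])
instance (all_value : List (List Int)) : Decidable (Pre_remove_same_time all_value) := by
  unfold Pre_remove_same_time; infer_instance

def pvWitness_remove_same_time : List (List Int) := [[1, 5], [1, 6], [2, 7]]

def Spec_remove_same_time (all_value : List (List Int)) (out : List (List Int)) : Prop :=
  out = remove_same_time_alt all_value
instance (all_value : List (List Int)) (out : List (List Int)) :
    Decidable (Spec_remove_same_time all_value out) := by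
  unfold Spec_remove_same_time; infer_instance

-- ===== CLAIM (what is proved, stated in full; the proofs are below) =====
def Claim_equal_remove_same_time : Prop :=
  ∀ (all_value : List (List Int)), Dom_remove_same_time all_value →
    Pre_remove_same_time all_value →
    Spec_remove_same_time all_value (remove_same_time all_value)

-- ===== LEMMAS AND PROOFS =====

-- common intermediate: keep each element whose key differs from its successor's, plus the last
def pvStep : List (List Int) → List (List Int)
  | [] => []
  | [x] => [x]
  | x :: y :: r => (if pvKey x = pvKey y then [] else [x]) ++ pvStep (y :: r)

-- the head of pvStep (y :: r) carries y's key
theorem pvStep_head (y : List Int) (r : List (List Int)) :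
    ∃ e t, pvStep (y :: r) = e :: t ∧ pvKey e = pvKey y := by
  induction r generalizing y with
  | nil => exact ⟨y, [], rfl, rfl⟩
  | cons z r ih =>
    obtain ⟨e, t, he, hk⟩ := ih z
    by_cases h : pvKey y = pvKey z
    · exact ⟨e, t, by simp [pvStep, h, he], by rw [hk, h]⟩
    · exact ⟨y, pvStep (z :: r), by simp [pvStep, h], rfl⟩

-- B's backwards loop over dropLast, seeded with the last element, builds pvStep reversed
theorem loopB_eq (xs : List (List Int)) (h : xs ≠ []) :
    (xs.dropLast.reverse).foldl pvBodyB [xs.getLast h] = (pvStep xs).reverse := by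
  induction xs with
  | nil => simp at h
  | cons x xs ih =>
    cases xs with
    | nil => rfl
    | cons y r =>
      have hne : y :: r ≠ [] := by simp
      have h1 : (x :: y :: r).dropLast = x :: (y :: r).dropLast := rfl
      have h2 : (x :: y :: r).getLast h = (y :: r).getLast hne := by
        rw [List.getLast_cons hne]
      rw [h1, h2, List.reverse_cons, List.foldl_append, ih hne, List.foldl_cons,
        List.foldl_nil]
      obtain ⟨e, t, he, hk⟩ := pvStep_head y r
      have hlast : PySem.List.pyGetD (pvStep (y :: r)).reverse (-1) [] = e := by
        rw [PySem.List.pyGetD_neg_one _ [] (by simp [he])]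
        simp [he]
      by_cases hxy : pvKey x = pvKey y
      · simp [pvBodyB, hlast, hk, hxy, pvStep]
      · simp [pvBodyB, hlast, hk, hxy, pvStep]

-- B equals pvStep on nonempty lists
theorem B_eq_pvStep (xs : List (List Int)) (h : xs ≠ []) :
    remove_same_time_alt xs = pvStep xs := by
  rw [remove_same_time_alt]
  simp only [PySem.List.slice_to_neg_one, PySem.List.pyGetD_neg_one xs [] h]
  rw [loopB_eq xs h, List.reverse_reverse]

-- Python (x::zs)[i+1] = zs[i] for 0 ≤ i
theorem pyGetD_cons_shift {α : Type} (x : α) (zs : List α) (i : Int) (hi : 0 ≤ i) (d : α) :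
    PySem.List.pyGetD (x :: zs) (i + 1) d = PySem.List.pyGetD zs i d := by
  obtain ⟨k, rfl⟩ := Int.eq_ofNat_of_zero_le hi
  have e : ((k : Nat) : Int) + 1 = ((k + 1 : Nat) : Int) := by push_cast; ring
  rw [e, PySem.List.pyGetD_natCast, PySem.List.pyGetD_natCast, List.getD_cons_succ]

-- shifting A's loop index past the head of the list
theorem fold_shift (x : List Int) (zs : List (List Int)) (acc : List (List Int)) (b : Int) :
    (PySem.List.pyRange 1 b 1).foldl (pvBodyA (x :: zs)) acc =
    (PySem.List.pyRange 0 (b - 1) 1).foldl (pvBodyA zs) acc := by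
  rw [PySem.List.pyRange_one 1 b, PySem.List.pyRange_one 0 (b - 1)]
  have : (b - 1).toNat = (b - 1 - 0).toNat := by omega
  rw [this]
  rw [List.foldl_map, List.foldl_map]
  apply PySem.List.foldl_congr_mem
  intro a k _
  simp only [pvBodyA, pvKey]
  rw [show (1 : Int) + (k : Int) = (k : Int) + 1 by ring,
      pyGetD_cons_shift x zs (k : Int) (by positivity),
      pyGetD_cons_shift x zs ((k : Int) + 1) (by positivity)]
  norm_num

-- the loop of A computes pvStep minus the trailing last element
theorem fold_eq (xs : List (List Int)) (acc : List (List Int)) (h : xs ≠ []) :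
    (PySem.List.pyRange 0 ((xs.length : Int) - 1) 1).foldl (pvBodyA xs) acc ++
      [xs.getLastD []] = acc ++ pvStep xs := by
  induction xs generalizing acc with
  | nil => simp at h
  | cons x xs ih =>
    cases xs with
    | nil => simp [pvStep]
    | cons y r =>
      have hlen : ((x :: y :: r).length : Int) - 1 = ((y :: r).length : Int) := by simp
      rw [hlen]
      have hpos : (0 : Int) < ((y :: r).length : Int) := by
        exact_mod_cast Nat.succ_pos r.length
      rw [PySem.List.pyRange_one_cons hpos, List.foldl_cons]
      rw [show (0 : Int) + 1 = 1 from rfl]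
      rw [fold_shift x (y :: r) (pvBodyA (x :: y :: r) acc 0) ((y :: r).length : Int)]
      have hbody : pvBodyA (x :: y :: r) acc 0 =
          if pvKey x = pvKey y then acc else acc ++ [x] := by
        simp only [pvBodyA, pvKey]
        rw [show (0 : Int) + 1 = ((1 : Nat) : Int) from rfl, PySem.List.pyGetD_natCast]
        norm_num [PySem.List.pyGetD_zero_cons]
      have hlast : (x :: y :: r).getLastD [] = (y :: r).getLastD [] := by simp
      rw [hbody, hlast, ih _ (by simp)]
      by_cases hk : pvKey x = pvKey y <;> simp [pvStep, hk]

-- A equals pvStep on nonempty lists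
theorem A_eq_pvStep (xs : List (List Int)) (h : xs ≠ []) :
    remove_same_time xs = pvStep xs := by
  rw [remove_same_time]
  have hlast : PySem.List.pyGetD xs ((xs.length : Int) - 1) [] = xs.getLastD [] := by
    have hn : 0 < xs.length := List.length_pos_of_ne_nil h
    have : ((xs.length : Int) - 1) = ((xs.length - 1 : Nat) : Int) := by omega
    rw [this, PySem.List.pyGetD_natCast]
    cases xs with
    | nil => simp at h
    | cons a l =>
      rw [List.getD_eq_getElem?_getD, List.getLastD_eq_getLast?]
      rw [List.getLast?_eq_getElem?]
  simp only [hlast]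
  exact fold_eq xs [] h

-- ===== VERDICT (by name: the statement is the Claim_ definition above) =====
theorem remove_same_time_spec : Claim_equal_remove_same_time := by
  intro xs _ hpre
  unfold Spec_remove_same_time
  rw [A_eq_pvStep xs hpre.1, B_eq_pvStep xs hpre.1]
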